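-- pv_equiv track=rewrite | github.com/sungrokgi/coding_python | 프로그래머스/lv2/131130. 혼자 놀기의 달인/혼자 놀기의 달인.py | solution
-- ===== SOURCE A (Python) =====
-- def solution(cards):
--     answer  = 0
--     c = []
--     visited = [0 for i in range(len(cards))]
--     for i, card in enumerate(cards):
--
--         if visited[i] == 0:
--             cnt =1
--             visited[i] = 1
--             idx = card-1
--             while True:
--                 if visited[idx] ==0:
--                     cnt+=1
--                     visited[idx] = 1
--                     idx = cards[idx] -1
--                 else:
--                     break
--             c.append(cnt)
--     c.sort()
--     if len(c) >=2:
--         return c[-1] *c[-2]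
--     else:
--         return 0
-- ===== SOURCE B (Python) =====
-- def solution(cards):
--     # Min-label propagation: first[j] becomes the smallest start index whose
--     # chain reaches j; group roots are the fixed points first[i] == i and the
--     # group sizes are read off a counting dict over the labels.
--     n = len(cards)
--     first = [n] * n
--     for i in range(n):
--         j = i
--         while first[j] > i:
--             first[j] = i
--             j = cards[j] - 1
--     cnt = {}
--     for lab in first:
--         cnt[lab] = cnt.get(lab, 0) + 1
--     sizes = sorted(cnt.get(i, 0) for i in range(n) if first[i] == i)
--     if len(sizes) >= 2:
--         return sizes[-1] * sizes[-2]
--     else: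
--         return 0
-- ===== Notes on version B (the rewrite author's own statement) =====
-- stated objective: alternative
-- what changed: Replaced the visited-array cycle walk with per-walk counters by min-label propagation (each index is labelled with the smallest start index reaching it) plus a counting dict over the labels, with cycle roots read off as the fixed points of the label array.
import Mathlib
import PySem

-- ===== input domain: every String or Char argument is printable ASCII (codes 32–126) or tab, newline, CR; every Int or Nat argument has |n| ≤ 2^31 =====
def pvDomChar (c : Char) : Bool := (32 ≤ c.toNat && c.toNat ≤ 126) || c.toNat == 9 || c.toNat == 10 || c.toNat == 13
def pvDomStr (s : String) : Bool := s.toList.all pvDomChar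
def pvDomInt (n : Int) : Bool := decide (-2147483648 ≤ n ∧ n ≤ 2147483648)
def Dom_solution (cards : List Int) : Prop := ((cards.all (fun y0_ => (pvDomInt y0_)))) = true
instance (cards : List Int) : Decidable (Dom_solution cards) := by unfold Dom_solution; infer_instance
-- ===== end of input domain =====

-- B replaces A's visited-array cycle walk (per-walk counters, list appends) by
-- min-label propagation plus a counting dict over the labels
-- (objective: alternative; not measured faster).


-- ===== PORT A =====
-- the 'while True' walk; fuel only guards totality (never exhausted under Pre_)
def walkA (cards : List Int) : Nat → List Int → Int → Int → List Int × Int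
  | 0, visited, _, cnt => (visited, cnt)
  | fuel + 1, visited, idx, cnt =>
    if PySem.List.pyGetD visited idx 1 = 0 then
      walkA cards fuel (PySem.List.pySetD visited idx 1)
        (PySem.List.pyGetD cards idx 0 - 1) (cnt + 1)
    else (visited, cnt)

-- body of A's 'for i, card in enumerate(cards)' loop
def stepA (cards : List Int) (s : List Int × List Int) (p : Int × Int) : List Int × List Int :=
  if PySem.List.pyGetD s.1 p.1 1 = 0 then
    let w := walkA cards cards.length (PySem.List.pySetD s.1 p.1 1) (p.2 - 1) 1
    (w.1, s.2 ++ [w.2])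
  else s

def solution (cards : List Int) : Int :=
  let res := (PySem.List.enumerate cards 0).foldl (stepA cards)
    (List.replicate cards.length 0, [])
  let c := PySem.List.sorted res.2 (fun x => x) false
  if 2 ≤ c.length then PySem.List.pyGetD c (-1) 0 * PySem.List.pyGetD c (-2) 0
  else 0

-- ===== PORT B =====
-- the 'while first[j] > i' label walk; fuel only guards totality (never exhausted under Pre_)
def walkB (cards : List Int) : Nat → List Int → Int → Int → List Int
  | 0, first, _, _ => first
  | fuel + 1, first, i, j =>
    if i < PySem.List.pyGetD first j 0 then
      walkB cards fuel (PySem.List.pySetD first j i) i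
        (PySem.List.pyGetD cards j 0 - 1)
    else first

-- body of B's 'for i in range(n)' loop
def stepB (cards : List Int) (first : List Int) (i : Int) : List Int :=
  walkB cards (cards.length + 1) first i i

def solution_alt (cards : List Int) : Int :=
  let n := cards.length
  let first := (PySem.List.pyRange 0 (n : Int) 1).foldl (stepB cards)
    (List.replicate n (n : Int))
  let cnt := first.foldl (fun d lab => d.modify lab 0 (fun t => t + 1))
    (PySem.Dict.empty : PySem.Dict Int Int)
  let sizes := PySem.List.sorted
    (((PySem.List.pyRange 0 (n : Int) 1).filter
        (fun i => PySem.List.pyGetD first i 0 == i)).map (fun i => cnt.getD i 0))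
    (fun x => x) false
  if 2 ≤ sizes.length then
    PySem.List.pyGetD sizes (-1) 0 * PySem.List.pyGetD sizes (-2) 0
  else 0

-- ===== PRECONDITION & SPEC =====
-- Pre_ is exactly where the Python A returns normally: every element (used as the
-- chained index cards[j]-1) lies in Python's valid wraparound index range
-- [1-n, n]; on any other list A (and B alike) raises IndexError.
def Pre_solution (cards : List Int) : Prop :=
  ∀ x ∈ cards, 1 - (cards.length : Int) ≤ x ∧ x ≤ (cards.length : Int)

instance (cards : List Int) : Decidable (Pre_solution cards) := by
  unfold Pre_solution; infer_instance

def pvWitness_solution : List Int := [2, 1, 0, -1, 5]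

def Spec_solution (cards : List Int) (out : Int) : Prop := out = solution_alt cards
instance (cards : List Int) (out : Int) : Decidable (Spec_solution cards out) := by
  unfold Spec_solution; infer_instance

-- ===== CLAIM (what is proved, stated in full; the proofs are below) =====
def Claim_equal_solution : Prop :=
  ∀ (cards : List Int), Dom_solution cards → Pre_solution cards →
    Spec_solution cards (solution cards)

-- ===== LEMMAS AND PROOFS =====

-- Python's wrapped index as a Nat position
def wrapIdx (n : Nat) (i : Int) : Nat := if 0 ≤ i then i.toNat else n - (-i).toNat

lemma wrapIdx_lt (n : Nat) (i : Int) (h1 : -(n : Int) ≤ i) (h2 : i < (n : Int)) :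
    wrapIdx n i < n := by
  unfold wrapIdx; split_ifs with h
  · omega
  · omega

lemma pyGetD_wrap (xs : List Int) (i : Int) (d : Int)
    (h1 : -(xs.length : Int) ≤ i) (h2 : i < (xs.length : Int)) :
    PySem.List.pyGetD xs i d = xs.getD (wrapIdx xs.length i) d := by
  simp only [PySem.List.pyGetD, PySem.List.pyGet?, PySem.List.pyIdx?, wrapIdx]
  split_ifs with h
  · simp [List.getD]
  · simp [List.getD]

lemma pySetD_wrap (xs : List Int) (i : Int) (v : Int)
    (h1 : -(xs.length : Int) ≤ i) (h2 : i < (xs.length : Int)) :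
    PySem.List.pySetD xs i v = xs.set (wrapIdx xs.length i) v := by
  simp only [PySem.List.pySetD, PySem.List.pySet?, PySem.List.pyIdx?, wrapIdx]
  split_ifs with h
  · simp
  · simp

lemma getD_set_self (l : List Int) (p : Nat) (x : Int) (h : p < l.length) :
    (l.set p x).getD p 0 = x := by
  simp [List.getD, List.getElem?_set, h]

lemma getD_set_ne (l : List Int) (p j : Nat) (x : Int) (h : j ≠ p) :
    (l.set p x).getD j 0 = l.getD j 0 := by
  simp [List.getD, List.getElem?_set, (Ne.symm h : p ≠ j)]

-- counts are invariant under changing entries from value a to value b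
lemma count_eq_of_changes (a b w : Int) (hwa : w ≠ a) (hwb : w ≠ b) :
    ∀ (l l' : List Int), l'.length = l.length →
      (∀ j, j < l.length → l'.getD j 0 = l.getD j 0 ∨
        (l.getD j 0 = a ∧ l'.getD j 0 = b)) →
      l'.count w = l.count w := by
  intro l
  induction l with
  | nil => intro l' hl _; simp [List.length_eq_zero_iff.mp hl]
  | cons x t ih =>
    intro l' hl hch
    match l' with
    | [] => simp at hl
    | y :: t' =>
      have h0 := hch 0 (by simp)
      have ht : t'.count w = t.count w := by
        apply ih
        · simpa using hl
        · intro j hj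
          have := hch (j + 1) (by simpa using Nat.succ_lt_succ hj)
          simpa using this
      simp only [List.getD_cons_zero] at h0
      rcases h0 with h0 | ⟨h0a, h0b⟩
      · simp [List.count_cons, h0, ht]
      · simp [List.count_cons, h0a, h0b, ht, Ne.symm hwa, Ne.symm hwb]

lemma count_zero_of_getD (l : List Int) (w : Int)
    (h : ∀ j, j < l.length → l.getD j 0 ≠ w) : l.count w = 0 := by
  rw [List.count_eq_zero]
  intro hmem
  obtain ⟨j, hj, hget⟩ := List.mem_iff_getElem.mp hmem
  exact h j hj (by simp [List.getD, List.getElem?_eq_getElem hj, hget])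

-- the simultaneous inner-walk simulation: A's while-True walk and B's label walk
-- take the same path, and A's counter is B's label count
lemma walk_sim (cards : List Int) (hpre : Pre_solution cards) (m : Nat)
    (hm : m < cards.length) :
    ∀ (fuel : Nat) (v fst : List Int) (idx : Int),
      v.length = cards.length → fst.length = cards.length →
      -(cards.length : Int) ≤ idx → idx < (cards.length : Int) →
      (∀ j, j < cards.length →
        (v.getD j 0 = 0 ↔ fst.getD j 0 = (cards.length : Int))) →
      (∀ j, j < cards.length →
        fst.getD j 0 = (cards.length : Int) ∨
          (0 ≤ fst.getD j 0 ∧ fst.getD j 0 ≤ (m : Int))) →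
      fst.count ((cards.length : Nat) : Int) + 1 ≤ fuel →
      ∃ v' fst',
        walkB cards fuel fst (m : Int) idx = fst' ∧
        walkA cards fuel v idx ((fst.count ((m : Nat) : Int) : Nat) : Int) =
          (v', ((fst'.count ((m : Nat) : Int) : Nat) : Int)) ∧
        v'.length = cards.length ∧ fst'.length = cards.length ∧
        (∀ j, j < cards.length →
          (v'.getD j 0 = 0 ↔ fst'.getD j 0 = (cards.length : Int))) ∧
        (∀ j, j < cards.length →
          fst'.getD j 0 = fst.getD j 0 ∨
            (fst.getD j 0 = (cards.length : Int) ∧ fst'.getD j 0 = (m : Int))) := by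
  intro fuel
  induction fuel with
  | zero =>
    intro v fst idx _ _ _ _ _ _ hfuel
    omega
  | succ fuel ih =>
    intro v fst idx hv hf hi1 hi2 h3 h4 hfuel
    have hp : wrapIdx cards.length idx < cards.length := wrapIdx_lt _ _ hi1 hi2
    set P := wrapIdx cards.length idx with hPdef
    have hpv : P < v.length := by omega
    have hpf : P < fst.length := by omega
    have hgv : PySem.List.pyGetD v idx 1 = v.getD P 0 := by
      rw [pyGetD_wrap v idx 1 (by rw [hv]; exact hi1) (by rw [hv]; exact hi2)]
      rw [hv]
      rw [List.getD_eq_getElem v 1 hpv, List.getD_eq_getElem v 0 hpv]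
    have hgf : PySem.List.pyGetD fst idx 0 = fst.getD P 0 := by
      rw [pyGetD_wrap fst idx 0 (by rw [hf]; exact hi1) (by rw [hf]; exact hi2), hf]
    have hnm : ((m : Nat) : Int) ≠ ((cards.length : Nat) : Int) := by
      exact_mod_cast Nat.ne_of_lt hm
    by_cases hn : fst.getD P 0 = ((cards.length : Nat) : Int)
    · -- fresh node: both walks step
      have hA : PySem.List.pyGetD v idx 1 = 0 := by
        rw [hgv]; exact (h3 P hp).mpr hn
      have hB : (m : Int) < PySem.List.pyGetD fst idx 0 := by
        rw [hgf, hn]; exact_mod_cast hm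
      have hsv : PySem.List.pySetD v idx 1 = v.set P 1 := by
        rw [pySetD_wrap v idx 1 (by rw [hv]; exact hi1) (by rw [hv]; exact hi2), hv]
      have hsf : PySem.List.pySetD fst idx ((m : Nat) : Int) = fst.set P ((m : Nat) : Int) := by
        rw [pySetD_wrap fst idx ((m : Nat) : Int) (by rw [hf]; exact hi1)
          (by rw [hf]; exact hi2), hf]
      have hgc : PySem.List.pyGetD cards idx 0 = cards.getD P 0 :=
        pyGetD_wrap cards idx 0 hi1 hi2
      have hmem : cards.getD P 0 ∈ cards := by
        rw [List.getD_eq_getElem cards 0 (by omega)]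
        exact List.getElem_mem _
      obtain ⟨hx1, hx2⟩ := hpre _ hmem
      have hi1' : -(cards.length : Int) ≤ PySem.List.pyGetD cards idx 0 - 1 := by
        rw [hgc]; omega
      have hi2' : PySem.List.pyGetD cards idx 0 - 1 < (cards.length : Int) := by
        rw [hgc]; omega
      have hgetP : fst[P] = fst.getD P 0 := (List.getD_eq_getElem fst 0 hpf).symm
      have hcm : (fst.set P ((m : Nat) : Int)).count ((m : Nat) : Int) =
          fst.count ((m : Nat) : Int) + 1 := by
        rw [List.count_set hpf, hgetP, hn]
        simp [Ne.symm hnm]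
      have hnmem : ((cards.length : Nat) : Int) ∈ fst := by
        rw [← hn, ← hgetP]; exact List.getElem_mem _
      have hcn1 : 1 ≤ fst.count ((cards.length : Nat) : Int) :=
        List.count_pos_iff.mpr hnmem
      have hcn : (fst.set P ((m : Nat) : Int)).count ((cards.length : Nat) : Int) =
          fst.count ((cards.length : Nat) : Int) - 1 := by
        rw [List.count_set hpf, hgetP, hn]
        simp [hnm]
      have hfuel' : (fst.set P ((m : Nat) : Int)).count ((cards.length : Nat) : Int) + 1 ≤ fuel := by
        omega
      have hv1l : (v.set P 1).length = cards.length := by simpa using hv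
      have hf1l : (fst.set P ((m : Nat) : Int)).length = cards.length := by simpa using hf
      have h3' : ∀ j, j < cards.length →
          ((v.set P 1).getD j 0 = 0 ↔
            (fst.set P ((m : Nat) : Int)).getD j 0 = (cards.length : Int)) := by
        intro j hj
        by_cases hjP : j = P
        · subst hjP
          rw [getD_set_self _ _ _ hpv, getD_set_self _ _ _ hpf]
          constructor
          · intro h; exact absurd h one_ne_zero
          · intro h; exact absurd h hnm
        · rw [getD_set_ne _ _ _ _ hjP, getD_set_ne _ _ _ _ hjP]
          exact h3 j hj
      have h4' : ∀ j, j < cards.length →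
          (fst.set P ((m : Nat) : Int)).getD j 0 = (cards.length : Int) ∨
            (0 ≤ (fst.set P ((m : Nat) : Int)).getD j 0 ∧
              (fst.set P ((m : Nat) : Int)).getD j 0 ≤ (m : Int)) := by
        intro j hj
        by_cases hjP : j = P
        · subst hjP
          rw [getD_set_self _ _ _ hpf]
          right
          constructor
          · exact_mod_cast Int.natCast_nonneg m
          · exact le_refl _
        · rw [getD_set_ne _ _ _ _ hjP]
          exact h4 j hj
      obtain ⟨v', fst', hB', hA', hvl', hfl', h3'', hch⟩ :=
        ih (v.set P 1) (fst.set P ((m : Nat) : Int))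
          (PySem.List.pyGetD cards idx 0 - 1) hv1l hf1l hi1' hi2' h3' h4' hfuel'
      refine ⟨v', fst', ?_, ?_, hvl', hfl', h3'', ?_⟩
      · simp only [walkB, if_pos hB]
        rw [hsf]
        exact hB'
      · simp only [walkA, if_pos hA]
        rw [hsv]
        have hcnt : ((fst.count ((m : Nat) : Int) : Nat) : Int) + 1 =
            (((fst.set P ((m : Nat) : Int)).count ((m : Nat) : Int) : Nat) : Int) := by
          rw [hcm]; push_cast; ring
        rw [hcnt]
        exact hA'
      · intro j hj
        rcases hch j hj with he | ⟨ha, hb⟩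
        · by_cases hjP : j = P
          · subst hjP
            right
            exact ⟨hn, by rw [he, getD_set_self _ _ _ hpf]⟩
          · left
            rw [he, getD_set_ne _ _ _ _ hjP]
        · have hjP : j ≠ P := by
            intro h
            subst h
            rw [getD_set_self _ _ _ hpf] at ha
            exact hnm ha
          rw [getD_set_ne _ _ _ _ hjP] at ha
          exact Or.inr ⟨ha, hb⟩
    · -- already-seen node: both walks stop
      have hA : ¬ PySem.List.pyGetD v idx 1 = 0 := by
        rw [hgv]
        intro h0
        exact hn ((h3 P hp).mp h0)
      have hB : ¬ (m : Int) < PySem.List.pyGetD fst idx 0 := by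
        rw [hgf]
        rcases h4 P hp with h | ⟨_, hle⟩
        · exact absurd h hn
        · omega
      refine ⟨v, fst, ?_, ?_, hv, hf, h3, fun j _ => Or.inl rfl⟩
      · simp only [walkB, if_neg hB]
      · simp only [walkA, if_neg hA]

-- the outer-loop invariant, by induction on the processed prefix
def InvAB (cards : List Int) (m : Nat) (v fst c : List Int) : Prop :=
  v.length = cards.length ∧ fst.length = cards.length ∧
  (∀ j, j < cards.length →
    (v.getD j 0 = 0 ↔ fst.getD j 0 = (cards.length : Int))) ∧
  (∀ j, j < cards.length →
    fst.getD j 0 = (cards.length : Int) ∨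
      (0 ≤ fst.getD j 0 ∧ fst.getD j 0 < (m : Int))) ∧
  c = ((List.range m).filter (fun i => fst.getD i 0 == ((i : Nat) : Int))).map
        (fun i => ((fst.count ((i : Nat) : Int) : Nat) : Int))

lemma outer_sim (cards : List Int) (hpre : Pre_solution cards) :
    ∀ m, m ≤ cards.length →
      ∃ v fst c,
        ((PySem.List.enumerate cards 0).take m).foldl (stepA cards)
          (List.replicate cards.length 0, []) = (v, c) ∧
        ((PySem.List.pyRange 0 (cards.length : Int) 1).take m).foldl (stepB cards)
          (List.replicate cards.length ((cards.length : Nat) : Int)) = fst ∧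
        InvAB cards m v fst c := by
  intro m
  induction m with
  | zero =>
    intro _
    refine ⟨List.replicate cards.length 0,
      List.replicate cards.length ((cards.length : Nat) : Int), [],
      by simp, by simp, by simp, by simp, ?_, ?_, by simp⟩
    · intro j hj
      rw [List.getD_replicate _ hj, List.getD_replicate _ hj]
      constructor
      · intro _; rfl
      · intro _; rfl
    · intro j hj
      rw [List.getD_replicate _ hj]
      exact Or.inl rfl
  | succ m ih =>
    intro hm1
    have hm : m < cards.length := hm1
    obtain ⟨v, fst, c, hAf, hBf, hvl, hfl, h3, h4, h5⟩ := ih (Nat.le_of_lt hm)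
    have hmv : m < v.length := by omega
    have hmf : m < fst.length := by omega
    have hnm : ((m : Nat) : Int) ≠ ((cards.length : Nat) : Int) := by
      exact_mod_cast Nat.ne_of_lt hm
    -- peel the (m+1)-st element off both folds
    have htA : (PySem.List.enumerate cards 0).take (m + 1) =
        (PySem.List.enumerate cards 0).take m ++ [(((m : Nat) : Int), cards[m])] := by
      rw [List.take_succ, PySem.List.getElem?_enumerate,
        List.getElem?_eq_getElem hm]
      simp
    have htB : (PySem.List.pyRange 0 (cards.length : Int) 1).take (m + 1) =
        (PySem.List.pyRange 0 (cards.length : Int) 1).take m ++ [((m : Nat) : Int)] := by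
      rw [List.take_succ, PySem.List.getElem?_pyRange_one]
      simp [hm]
    rw [htA, List.foldl_append, hAf]
    rw [htB, List.foldl_append, hBf]
    have hgv : PySem.List.pyGetD v ((m : Nat) : Int) 1 = v.getD m 0 := by
      rw [PySem.List.pyGetD_natCast, List.getD_eq_getElem v 1 hmv,
        List.getD_eq_getElem v 0 hmv]
    have hgf : PySem.List.pyGetD fst ((m : Nat) : Int) 0 = fst.getD m 0 := by
      rw [PySem.List.pyGetD_natCast]
    by_cases hn : fst.getD m 0 = ((cards.length : Nat) : Int)
    · -- start index m is fresh: both sides run the walk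
      have hA0 : PySem.List.pyGetD v ((m : Nat) : Int) 1 = 0 := by
        rw [hgv]; exact (h3 m hm).mpr hn
      have hB0 : ((m : Nat) : Int) < PySem.List.pyGetD fst ((m : Nat) : Int) 0 := by
        rw [hgf, hn]; exact_mod_cast hm
      have hgc : PySem.List.pyGetD cards ((m : Nat) : Int) 0 = cards.getD m 0 := by
        rw [PySem.List.pyGetD_natCast]
      have hmem : cards.getD m 0 ∈ cards := by
        rw [List.getD_eq_getElem cards 0 hm]
        exact List.getElem_mem _
      obtain ⟨hx1, hx2⟩ := hpre _ hmem
      have hgetm : fst[m] = fst.getD m 0 := (List.getD_eq_getElem fst 0 hmf).symm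
      have hcm0 : fst.count ((m : Nat) : Int) = 0 := by
        apply count_zero_of_getD
        intro j hj
        have hj' : j < cards.length := by omega
        rcases h4 j hj' with h | ⟨_, hlt⟩
        · rw [h]; exact Ne.symm hnm
        · intro he; rw [he] at hlt; exact absurd hlt (by exact_mod_cast Nat.lt_irrefl m)
      have hcm1 : (fst.set m ((m : Nat) : Int)).count ((m : Nat) : Int) = 1 := by
        rw [List.count_set hmf, hgetm, hn, hcm0]
        simp [Ne.symm hnm]
      have hnmem : ((cards.length : Nat) : Int) ∈ fst := by
        rw [← hn, ← hgetm]; exact List.getElem_mem _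
      have hcn1 : 1 ≤ fst.count ((cards.length : Nat) : Int) :=
        List.count_pos_iff.mpr hnmem
      have hcnle : fst.count ((cards.length : Nat) : Int) ≤ cards.length := by
        calc fst.count ((cards.length : Nat) : Int) ≤ fst.length := List.count_le_length
        _ = cards.length := hfl
      have hcn : (fst.set m ((m : Nat) : Int)).count ((cards.length : Nat) : Int) =
          fst.count ((cards.length : Nat) : Int) - 1 := by
        rw [List.count_set hmf, hgetm, hn]
        simp [hnm]
      have hfuel : (fst.set m ((m : Nat) : Int)).count ((cards.length : Nat) : Int) + 1 ≤
          cards.length := by omega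
      have h3' : ∀ j, j < cards.length →
          ((v.set m 1).getD j 0 = 0 ↔
            (fst.set m ((m : Nat) : Int)).getD j 0 = (cards.length : Int)) := by
        intro j hj
        by_cases hjm : j = m
        · subst hjm
          rw [getD_set_self _ _ _ hmv, getD_set_self _ _ _ hmf]
          constructor
          · intro h; exact absurd h one_ne_zero
          · intro h; exact absurd h hnm
        · rw [getD_set_ne _ _ _ _ hjm, getD_set_ne _ _ _ _ hjm]
          exact h3 j hj
      have h4' : ∀ j, j < cards.length →
          (fst.set m ((m : Nat) : Int)).getD j 0 = (cards.length : Int) ∨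
            (0 ≤ (fst.set m ((m : Nat) : Int)).getD j 0 ∧
              (fst.set m ((m : Nat) : Int)).getD j 0 ≤ (m : Int)) := by
        intro j hj
        by_cases hjm : j = m
        · subst hjm
          rw [getD_set_self _ _ _ hmf]
          exact Or.inr ⟨by omega, le_refl _⟩
        · rw [getD_set_ne _ _ _ _ hjm]
          rcases h4 j hj with h | ⟨h1, h2⟩
          · exact Or.inl h
          · exact Or.inr ⟨h1, by omega⟩
      obtain ⟨v', fst', hB', hA', hvl', hfl', h3'', hch1⟩ :=
        walk_sim cards hpre m hm cards.length (v.set m 1) (fst.set m ((m : Nat) : Int))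
          (cards.getD m 0 - 1) (by simpa using hvl) (by simpa using hfl)
          (by omega) (by omega) h3' h4' hfuel
      -- composed change description: fst' versus fst
      have hch : ∀ j, j < cards.length →
          fst'.getD j 0 = fst.getD j 0 ∨
            (fst.getD j 0 = (cards.length : Int) ∧ fst'.getD j 0 = ((m : Nat) : Int)) := by
        intro j hj
        rcases hch1 j hj with he | ⟨ha, hb⟩
        · by_cases hjm : j = m
          · subst hjm
            rw [getD_set_self _ _ _ hmf] at he
            exact Or.inr ⟨hn, he⟩
          · rw [getD_set_ne _ _ _ _ hjm] at he
            exact Or.inl he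
        · have hjm : j ≠ m := by
            intro h
            subst h
            rw [getD_set_self _ _ _ hmf] at ha
            exact hnm ha
          rw [getD_set_ne _ _ _ _ hjm] at ha
          exact Or.inr ⟨ha, hb⟩
      have hfstm : fst'.getD m 0 = ((m : Nat) : Int) := by
        rcases hch1 m hm with he | ⟨ha, hb⟩
        · rw [he, getD_set_self _ _ _ hmf]
        · exact hb
      -- the two step functions
      have hstepA : stepA cards (v, c) (((m : Nat) : Int), cards[m]) =
          (v', c ++ [((fst'.count ((m : Nat) : Int) : Nat) : Int)]) := by
        unfold stepA
        rw [if_pos hA0]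
        have harg : (cards[m] : Int) - 1 = cards.getD m 0 - 1 := by
          rw [List.getD_eq_getElem cards 0 hm]
        simp only [PySem.List.pySetD_natCast]
        rw [harg]
        have hA'' : walkA cards cards.length (v.set m 1) (cards.getD m 0 - 1) 1 =
            (v', ((fst'.count ((m : Nat) : Int) : Nat) : Int)) := by
          have h := hA'
          rw [hcm1] at h
          simpa using h
        rw [hA'']
      have hstepB : stepB cards fst ((m : Nat) : Int) = fst' := by
        unfold stepB
        simp only [walkB, if_pos hB0]
        rw [PySem.List.pySetD_natCast, hgc]
        exact hB'
      refine ⟨v', fst', c ++ [((fst'.count ((m : Nat) : Int) : Nat) : Int)],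
        by simp [hstepA], by simp [hstepB], hvl', hfl', h3'', ?_, ?_⟩
      · intro j hj
        rcases hch j hj with he | ⟨_, hb⟩
        · rw [he]
          rcases h4 j hj with h | ⟨h1, h2⟩
          · exact Or.inl h
          · exact Or.inr ⟨h1, by omega⟩
        · rw [hb]
          refine Or.inr ⟨by exact_mod_cast Int.natCast_nonneg m, ?_⟩
          exact_mod_cast Nat.lt_succ_self m
      · -- the c-list invariant at m+1
        rw [List.range_succ, List.filter_append, List.map_append]
        have hhead : ((List.range m).filter
              (fun i => fst'.getD i 0 == ((i : Nat) : Int))).map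
              (fun i => ((fst'.count ((i : Nat) : Int) : Nat) : Int)) =
            ((List.range m).filter
              (fun i => fst.getD i 0 == ((i : Nat) : Int))).map
              (fun i => ((fst.count ((i : Nat) : Int) : Nat) : Int)) := by
          have hfeq : ∀ i ∈ List.range m,
              (fst'.getD i 0 == ((i : Nat) : Int)) =
                (fst.getD i 0 == ((i : Nat) : Int)) := by
            intro i hi
            have him : i < m := List.mem_range.mp hi
            have hic : i < cards.length := by omega
            rcases hch i hic with he | ⟨ha, hb⟩
            · rw [he]
            · rw [ha, hb]
              have h1 : (((cards.length : Nat) : Int) == ((i : Nat) : Int)) = false := by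
                simp; exact_mod_cast Nat.ne_of_gt hic
              have h2 : (((m : Nat) : Int) == ((i : Nat) : Int)) = false := by
                simp; exact_mod_cast Nat.ne_of_gt him
              rw [h1, h2]
          rw [List.filter_congr hfeq]
          apply List.map_congr_left
          intro i hi
          have him : i < m := List.mem_range.mp (List.mem_of_mem_filter hi)
          have hcnteq : fst'.count ((i : Nat) : Int) = fst.count ((i : Nat) : Int) := by
            apply count_eq_of_changes ((cards.length : Nat) : Int) ((m : Nat) : Int)
              ((i : Nat) : Int)
              (by exact_mod_cast Nat.ne_of_lt (by omega))
              (by exact_mod_cast Nat.ne_of_lt him)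
              fst fst' (by omega)
            intro j hj
            exact hch j (by omega)
          rw [hcnteq]
        rw [hhead, ← h5]
        have htail : (([m].filter (fun i => fst'.getD i 0 == ((i : Nat) : Int))).map
            (fun i => ((fst'.count ((i : Nat) : Int) : Nat) : Int))) =
            [((fst'.count ((m : Nat) : Int) : Nat) : Int)] := by
          have : (fst'.getD m 0 == ((m : Nat) : Int)) = true := by
            rw [hfstm]; simp
          rw [List.filter_singleton, this]
          simp
        rw [htail]
    · -- start index m was seen before: both sides skip
      have hlt : 0 ≤ fst.getD m 0 ∧ fst.getD m 0 < ((m : Nat) : Int) := by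
        rcases h4 m hm with h | h
        · exact absurd h hn
        · exact h
      have hA0 : ¬ PySem.List.pyGetD v ((m : Nat) : Int) 1 = 0 := by
        rw [hgv]
        intro h0
        exact hn ((h3 m hm).mp h0)
      have hB0 : ¬ ((m : Nat) : Int) < PySem.List.pyGetD fst ((m : Nat) : Int) 0 := by
        rw [hgf]; omega
      have hstepA : stepA cards (v, c) (((m : Nat) : Int), cards[m]) = (v, c) := by
        unfold stepA
        rw [if_neg hA0]
      have hstepB : stepB cards fst ((m : Nat) : Int) = fst := by
        unfold stepB
        simp only [walkB, if_neg hB0]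
      refine ⟨v, fst, c, by simp [hstepA], by simp [hstepB], hvl, hfl, h3, ?_, ?_⟩
      · intro j hj
        rcases h4 j hj with h | ⟨h1, h2⟩
        · exact Or.inl h
        · exact Or.inr ⟨h1, by omega⟩
      · rw [List.range_succ, List.filter_append, List.map_append, ← h5]
        have htail : (([m].filter (fun i => fst.getD i 0 == ((i : Nat) : Int))).map
            (fun i => ((fst.count ((i : Nat) : Int) : Nat) : Int))) = [] := by
          have : (fst.getD m 0 == ((m : Nat) : Int)) = false := by
            rw [beq_eq_false_iff_ne]; omega
          rw [List.filter_singleton, this]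
          simp
        rw [htail, List.append_nil]

theorem solution_spec : Claim_equal_solution := by
  unfold Claim_equal_solution
  intro cards _ hpre
  unfold Spec_solution
  obtain ⟨v, fst, c, hAf, hBf, hvl, hfl, h3, h4, h5⟩ :=
    outer_sim cards hpre cards.length (le_refl _)
  have hTA : (PySem.List.enumerate cards 0).take cards.length =
      PySem.List.enumerate cards 0 := by
    apply List.take_of_length_le
    rw [PySem.List.length_enumerate]
  have hTB : (PySem.List.pyRange 0 (cards.length : Int) 1).take cards.length =
      PySem.List.pyRange 0 (cards.length : Int) 1 := by
    apply List.take_of_length_le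
    rw [PySem.List.length_pyRange_one]
    simp
  rw [hTA] at hAf
  rw [hTB] at hBf
  have hsz : ((PySem.List.pyRange 0 (cards.length : Int) 1).filter
        (fun i => PySem.List.pyGetD fst i 0 == i)).map
        (fun i => (fst.foldl (fun d lab => d.modify lab 0 (fun t => t + 1))
          (PySem.Dict.empty : PySem.Dict Int Int)).getD i 0) = c := by
    rw [h5, PySem.List.pyRange_one]
    simp only [Int.sub_zero, Int.toNat_natCast, Int.zero_add]
    rw [List.filter_map, List.map_map]
    have hpeq : ∀ k ∈ List.range cards.length,
        ((fun i => PySem.List.pyGetD fst i 0 == i) ∘ (fun k : Nat => ((k : Nat) : Int))) k =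
          (fun i => fst.getD i 0 == ((i : Nat) : Int)) k := by
      intro k _
      simp [PySem.List.pyGetD_natCast]
    rw [List.filter_congr hpeq]
    apply List.map_congr_left
    intro k _
    simp only [Function.comp]
    rw [PySem.Dict.getD_foldl_modify_add_one]
    simp [PySem.Dict.getD, PySem.Dict.get?_empty]
  simp only [solution, solution_alt]
  rw [hAf, hBf, hsz]
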